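-- pv_equiv track=rewrite | github.com/timotree3/hanabi-1 | players/ref_sieve_player.py | is_clued
-- ===== SOURCE A (Python) =====
-- def is_clued(card_possibilities):
--     if len(card_possibilities) > 5:
--         return False
--     possible_ranks_per_suit = {}
--     possible_suits_per_rank = {}
--     for possibility in card_possibilities:
--         rank = possibility[0]
--         suit = possibility[1]
--         try:
--             possible_ranks_per_suit[suit].add(rank)
--         except KeyError:
--             possible_ranks_per_suit[suit] = set([rank])
--         try:
--             possible_suits_per_rank[rank].add(suit)
--         except KeyError:
--             possible_suits_per_rank[rank] = set([suit])
--     return \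
--         all([
--             len(ranks) == 1
--             for ranks in possible_ranks_per_suit.values()])\
--         or all([
--             len(suits) == 1
--             for suits in possible_suits_per_rank.values()])
-- ===== SOURCE B (Python) =====
-- def is_clued(card_possibilities):
--     if len(card_possibilities) > 5:
--         return False
--     suits = set()
--     ranks = set()
--     pairs = set()
--     for rank, suit in card_possibilities:
--         suits.add(suit)
--         ranks.add(rank)
--         pairs.add((rank, suit))
--     return len(pairs) == len(suits) or len(pairs) == len(ranks)
-- ===== Notes on version B (the rewrite author's own statement) =====
-- stated objective: simpler
-- what changed: Replaces the two dicts-of-sets and per-group all(len==1) checks by three flat sets built in one pass, deciding via the cardinality identity |distinct pairs| == |distinct suits| (resp. ranks).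
import Mathlib
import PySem

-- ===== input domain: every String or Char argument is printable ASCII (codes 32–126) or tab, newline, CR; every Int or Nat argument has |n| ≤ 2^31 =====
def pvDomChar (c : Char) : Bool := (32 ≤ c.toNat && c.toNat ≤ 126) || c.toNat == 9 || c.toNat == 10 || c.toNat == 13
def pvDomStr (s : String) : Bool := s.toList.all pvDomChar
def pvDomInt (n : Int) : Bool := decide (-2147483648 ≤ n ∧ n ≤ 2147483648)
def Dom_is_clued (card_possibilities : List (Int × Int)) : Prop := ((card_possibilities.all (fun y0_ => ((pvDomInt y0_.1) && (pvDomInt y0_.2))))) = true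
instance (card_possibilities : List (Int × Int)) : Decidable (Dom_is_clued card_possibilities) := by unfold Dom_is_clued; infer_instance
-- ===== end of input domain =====

-- B replaces A's two dicts-of-sets and per-group all(len==1) checks by three flat sets
-- and two cardinality comparisons; same return value, no speed claim.
-- ===== PORT A =====
-- Port of A: one loop building two dicts (suit -> set of ranks, rank -> set of suits),
-- then all(len == 1) over each dict's values.
def is_clued (card_possibilities : List (Int × Int)) : Bool :=
  if card_possibilities.length > 5 then false
  else
    let st := card_possibilities.foldl
      (fun (st : PySem.Dict Int (PySem.Set Int) × PySem.Dict Int (PySem.Set Int)) possibility =>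
        ((match st.1.get? possibility.2 with
          | some s => st.1.insert possibility.2 (PySem.Set.add s possibility.1)
          | none => st.1.insert possibility.2 (PySem.Set.ofList [possibility.1])),
         (match st.2.get? possibility.1 with
          | some s => st.2.insert possibility.1 (PySem.Set.add s possibility.2)
          | none => st.2.insert possibility.1 (PySem.Set.ofList [possibility.2]))))
      (PySem.Dict.empty, PySem.Dict.empty)
    (st.1.values.all (fun ranks => ranks.length == 1))
      || (st.2.values.all (fun suits => suits.length == 1))

-- ===== PORT B =====
-- Port of B: one loop over the possibilities maintaining three flat sets
-- (suits, ranks, pairs), then two cardinality comparisons.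
def is_clued_alt (card_possibilities : List (Int × Int)) : Bool :=
  if card_possibilities.length > 5 then false
  else
    let st := card_possibilities.foldl
      (fun (st : PySem.Set Int × PySem.Set Int × PySem.Set (Int × Int)) p =>
        (PySem.Set.add st.1 p.2, PySem.Set.add st.2.1 p.1, PySem.Set.add st.2.2 (p.1, p.2)))
      ([], [], [])
    (st.2.2.length == st.1.length) || (st.2.2.length == st.2.1.length)

-- ===== PRECONDITION & SPEC =====
def Spec_is_clued (card_possibilities : List (Int × Int)) (out : Bool) : Prop := out = is_clued_alt card_possibilities
instance (card_possibilities : List (Int × Int)) (out : Bool) : Decidable (Spec_is_clued card_possibilities out) := by unfold Spec_is_clued; infer_instance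

-- ===== CLAIM (what is proved, stated in full; the proofs are below) =====
def Claim_equal_is_clued : Prop := ∀ (card_possibilities : List (Int × Int)), Dom_is_clued card_possibilities → Spec_is_clued card_possibilities (is_clued card_possibilities)

-- ===== LEMMAS AND PROOFS =====

-- the two branches of A's dict update are one uniform insert
lemma pvDictFold_step (k v : Int × Int → Int) (d : PySem.Dict Int (PySem.Set Int)) (p : Int × Int) :
    (match d.get? (k p) with
      | some s => d.insert (k p) (PySem.Set.add s (v p))
      | none => d.insert (k p) (PySem.Set.ofList [v p]))
      = d.insert (k p) (PySem.Set.add (d.getD (k p) []) (v p)) := by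
  cases h : d.get? (k p) with
  | some s => simp [PySem.Dict.getD_eq_get?_getD, h]
  | none => simp [PySem.Dict.getD_eq_get?_getD, h, PySem.Set.add, PySem.Set.ofList]
-- the distinct keys (under k) of cps, in first-occurrence order
def pvKeysOf (k : Int × Int → Int) (cps : List (Int × Int)) : PySem.Set Int :=
  PySem.Set.ofList (cps.map k)

-- the distinct values (under v) of the entries of cps whose key is s
def pvGrp (k v : Int × Int → Int) (cps : List (Int × Int)) (s : Int) : PySem.Set Int :=
  PySem.Set.ofList ((cps.filter (fun p => k p == s)).map v)

-- one side of A's dict-building loop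
def pvDictFold (k v : Int × Int → Int) (cps : List (Int × Int)) : PySem.Dict Int (PySem.Set Int) :=
  cps.foldl
    (fun d p =>
      match d.get? (k p) with
      | some s => d.insert (k p) (PySem.Set.add s (v p))
      | none => d.insert (k p) (PySem.Set.ofList [v p]))
    PySem.Dict.empty

lemma pvDictFold_eq (k v : Int × Int → Int) (cps : List (Int × Int)) :
    pvDictFold k v cps
      = cps.foldl (fun d p => d.insert (k p) (PySem.Set.add (d.getD (k p) []) (v p)))
          PySem.Dict.empty := by
  unfold pvDictFold
  simp only [pvDictFold_step]

lemma pvDictFold_keys (k v : Int × Int → Int) (cps : List (Int × Int)) :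
    (pvDictFold k v cps).keys = pvKeysOf k cps := by
  rw [pvDictFold_eq]
  rw [PySem.Dict.keys_foldl_insert_key]
  simp [pvKeysOf, PySem.Set.update_nil_left]

lemma pvDictFold_getD (k v : Int × Int → Int) (cps : List (Int × Int)) (s : Int) :
    (pvDictFold k v cps).getD s [] = pvGrp k v cps s := by
  rw [pvDictFold_eq]
  induction cps using List.reverseRecOn with
  | nil => simp [pvGrp]
  | append_singleton xs p ih =>
    rw [List.foldl_append, List.foldl_cons, List.foldl_nil]
    rw [PySem.Dict.getD_insert]
    by_cases hs : s = k p
    · subst hs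
      simp only [ih]
      simp [pvGrp, List.filter_append, PySem.Set.ofList_append_singleton]
    · rw [if_neg hs, ih]
      simp [pvGrp, List.filter_append, Ne.symm hs]

lemma pvMem_grp (k v : Int × Int → Int)
    (hinj : ∀ p q : Int × Int, k p = k q → v p = v q → p = q)
    (cps : List (Int × Int)) (p : Int × Int) :
    v p ∈ pvGrp k v cps (k p) ↔ p ∈ cps := by
  simp only [pvGrp, PySem.Set.mem_ofList, List.mem_map, List.mem_filter]
  constructor
  · rintro ⟨q, ⟨hq, hkq⟩, hvq⟩
    have : q = p := hinj q p (by simpa using hkq) hvq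
    simpa [this] using hq
  · intro hp
    exact ⟨p, ⟨hp, by simp⟩, rfl⟩

lemma pvGrp_ne_nil (k v : Int × Int → Int) (cps : List (Int × Int)) (s : Int)
    (hs : s ∈ pvKeysOf k cps) : pvGrp k v cps s ≠ [] := by
  simp only [pvKeysOf, PySem.Set.mem_ofList, List.mem_map] at hs
  obtain ⟨p, hp, hk⟩ := hs
  have : v p ∈ pvGrp k v cps s := by
    simp only [pvGrp, PySem.Set.mem_ofList, List.mem_map, List.mem_filter]
    exact ⟨p, ⟨hp, by simp [hk]⟩, rfl⟩
  intro h
  rw [h] at this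
  exact absurd this (List.not_mem_nil)

lemma pvLen_eq_sum (k v : Int × Int → Int)
    (hinj : ∀ p q : Int × Int, k p = k q → v p = v q → p = q) (cps : List (Int × Int)) :
    (PySem.Set.ofList cps).length
      = (((pvKeysOf k cps).map (fun s => (pvGrp k v cps s).length)).sum) := by
  induction cps using List.reverseRecOn with
  | nil => simp [pvKeysOf]
  | append_singleton xs p ih =>
    have hK : pvKeysOf k (xs ++ [p]) = PySem.Set.add (pvKeysOf k xs) (k p) := by
      simp [pvKeysOf, PySem.Set.ofList_append_singleton]
    have hGrp_ne : ∀ s, s ≠ k p → pvGrp k v (xs ++ [p]) s = pvGrp k v xs s := by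
      intro s hs
      simp [pvGrp, List.filter_append, Ne.symm hs]
    have hGrp_eq : pvGrp k v (xs ++ [p]) (k p)
        = PySem.Set.add (pvGrp k v xs (k p)) (v p) := by
      simp [pvGrp, List.filter_append, PySem.Set.ofList_append_singleton]
    rw [PySem.Set.ofList_append_singleton, hK]
    by_cases hkp : k p ∈ pvKeysOf k xs
    · -- key already present
      rw [PySem.Set.add_of_mem hkp]
      have hnd : (pvKeysOf k xs).Nodup := PySem.Set.nodup_ofList _
      have hperm : List.Perm (pvKeysOf k xs) (k p :: (pvKeysOf k xs).erase (k p)) :=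
        List.perm_cons_erase hkp
      have hnotin : k p ∉ (pvKeysOf k xs).erase (k p) :=
        (List.nodup_cons.mp (hperm.nodup_iff.mp hnd)).1
      have hsum : ∀ (g : Int → ℕ),
          ((pvKeysOf k xs).map g).sum = g (k p) + (((pvKeysOf k xs).erase (k p)).map g).sum := by
        intro g
        have := hperm.map g
        rw [this.sum_eq]
        simp
      rw [hsum]
      have herase : ∀ s ∈ (pvKeysOf k xs).erase (k p),
          (pvGrp k v (xs ++ [p]) s).length = (pvGrp k v xs s).length := by
        intro s hsmem
        rw [hGrp_ne s (fun h => hnotin (h ▸ hsmem))]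
      rw [List.map_congr_left herase, hGrp_eq]
      by_cases hmem : p ∈ xs
      · have hv : v p ∈ pvGrp k v xs (k p) := (pvMem_grp k v hinj xs p).mpr hmem
        rw [PySem.Set.add_of_mem (by simpa using hmem), PySem.Set.add_of_mem hv, ih, hsum]
      · have hv : v p ∉ pvGrp k v xs (k p) := fun h => hmem ((pvMem_grp k v hinj xs p).mp h)
        rw [PySem.Set.add_of_not_mem (by simpa using hmem), PySem.Set.add_of_not_mem hv]
        rw [List.length_append, ih, hsum]
        simp [Nat.add_comm, Nat.add_assoc, Nat.add_left_comm]
    · -- new key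
      rw [PySem.Set.add_of_not_mem hkp]
      have hpnot : p ∉ xs := fun h => hkp (by
        simp only [pvKeysOf, PySem.Set.mem_ofList, List.mem_map]
        exact ⟨p, h, rfl⟩)
      rw [PySem.Set.add_of_not_mem (by simpa using hpnot)]
      rw [List.map_append, List.sum_append, List.length_append, ih]
      have herase : ∀ s ∈ pvKeysOf k xs,
          (pvGrp k v (xs ++ [p]) s).length = (pvGrp k v xs s).length := by
        intro s hsmem
        rw [hGrp_ne s (fun h => hkp (h ▸ hsmem))]
      rw [List.map_congr_left herase]
      have hempty : pvGrp k v xs (k p) = [] := by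
        rw [List.eq_nil_iff_forall_not_mem]
        intro x hx
        simp only [pvGrp, PySem.Set.mem_ofList, List.mem_map, List.mem_filter] at hx
        obtain ⟨q, ⟨hq, hkq⟩, _⟩ := hx
        exact hkp (by
          simp only [pvKeysOf, PySem.Set.mem_ofList, List.mem_map]
          exact ⟨q, hq, by simpa using hkq⟩)
      simp only [List.map_cons, List.map_nil, List.sum_cons, List.sum_nil]
      rw [hGrp_eq, hempty]
      simp [PySem.Set.add]

lemma pvSum_ge (L : List (PySem.Set Int)) (h : ∀ g ∈ L, g ≠ []) :
    L.length ≤ (L.map (fun g => g.length)).sum := by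
  induction L with
  | nil => simp
  | cons g L ih =>
    have h1 : 1 ≤ g.length := List.length_pos_of_ne_nil (h g (by simp))
    have := ih (fun g hg => h g (by simp [hg]))
    simp only [List.map_cons, List.sum_cons, List.length_cons]
    omega

lemma pvAll_one_iff (L : List (PySem.Set Int)) (h : ∀ g ∈ L, g ≠ []) :
    (L.all (fun g => g.length == 1)) = ((L.map (fun g => g.length)).sum == L.length) := by
  induction L with
  | nil => simp
  | cons g L ih =>
    have h1 : 1 ≤ g.length := List.length_pos_of_ne_nil (h g (by simp))
    have hge := pvSum_ge L (fun g hg => h g (by simp [hg]))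
    rw [List.all_cons, ih (fun g hg => h g (by simp [hg]))]
    simp only [List.map_cons, List.sum_cons, List.length_cons]
    apply Bool.eq_iff_iff.mpr
    simp only [Bool.and_eq_true, beq_iff_eq]
    omega

lemma pvSide (k v : Int × Int → Int)
    (hinj : ∀ p q : Int × Int, k p = k q → v p = v q → p = q) (cps : List (Int × Int)) :
    ((pvDictFold k v cps).values.all (fun g => g.length == 1))
      = ((PySem.Set.ofList cps).length == (pvKeysOf k cps).length) := by
  have hnd : (pvDictFold k v cps).keys.Nodup := by
    rw [pvDictFold_keys]; exact PySem.Set.nodup_ofList _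
  rw [PySem.Dict.values_eq_map_keys _ hnd ([] : PySem.Set Int), pvDictFold_keys]
  have hGrp : (pvKeysOf k cps).map (fun s => (pvDictFold k v cps).getD s [])
      = (pvKeysOf k cps).map (fun s => pvGrp k v cps s) :=
    List.map_congr_left (fun s _ => pvDictFold_getD k v cps s)
  rw [hGrp]
  rw [pvAll_one_iff _ (by
    intro g hg
    rw [List.mem_map] at hg
    obtain ⟨s, hs, rfl⟩ := hg
    exact pvGrp_ne_nil k v cps s hs)]
  rw [List.map_map, List.length_map]
  rw [pvLen_eq_sum k v hinj cps]
  rfl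

lemma pvMain (cps : List (Int × Int)) : is_clued cps = is_clued_alt cps := by
  unfold is_clued is_clued_alt
  by_cases h : cps.length > 5
  · simp only [if_pos h]
  · simp only [if_neg h]
    rw [PySem.List.foldl_prod_mk
      (f := fun (d : PySem.Dict Int (PySem.Set Int)) (p : Int × Int) =>
        match d.get? p.2 with
        | some s => d.insert p.2 (PySem.Set.add s p.1)
        | none => d.insert p.2 (PySem.Set.ofList [p.1]))
      (g := fun (d : PySem.Dict Int (PySem.Set Int)) (p : Int × Int) =>
        match d.get? p.1 with
        | some s => d.insert p.1 (PySem.Set.add s p.2)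
        | none => d.insert p.1 (PySem.Set.ofList [p.2]))]
    rw [PySem.List.foldl_prod_mk
      (f := fun (s : PySem.Set Int) (p : Int × Int) => PySem.Set.add s p.2)
      (g := fun (s : PySem.Set Int × PySem.Set (Int × Int)) (p : Int × Int) =>
        (PySem.Set.add s.1 p.1, PySem.Set.add s.2 (p.1, p.2)))]
    rw [PySem.List.foldl_prod_mk
      (f := fun (s : PySem.Set Int) (p : Int × Int) => PySem.Set.add s p.1)
      (g := fun (s : PySem.Set (Int × Int)) (p : Int × Int) => PySem.Set.add s (p.1, p.2))]
    rw [← PySem.Set.update_map_eq_foldl_add (f := fun p : Int × Int => p.2),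
        ← PySem.Set.update_map_eq_foldl_add (f := fun p : Int × Int => p.1),
        ← PySem.Set.update_map_eq_foldl_add (f := fun p : Int × Int => (p.1, p.2)),
        PySem.Set.update_nil_left, PySem.Set.update_nil_left, PySem.Set.update_nil_left]
    have hmapid : cps.map (fun p : Int × Int => (p.1, p.2)) = cps := by simp
    rw [hmapid]
    have h1 := pvSide (fun p : Int × Int => p.2) (fun p => p.1)
      (fun p q h2 h1 => Prod.ext_iff.mpr ⟨h1, h2⟩) cps
    have h2 := pvSide (fun p : Int × Int => p.1) (fun p => p.2)
      (fun p q h1 h2 => Prod.ext_iff.mpr ⟨h1, h2⟩) cps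
    simp only [pvDictFold, pvKeysOf] at h1 h2
    rw [h1, h2]

-- ===== VERDICT (by name: the statement is the Claim_ definition above) =====
theorem is_clued_spec : Claim_equal_is_clued := by
  intro cps _
  unfold Spec_is_clued
  exact pvMain cps
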